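-- pv_equiv track=rewrite | github.com/oleksii-harmash/kpi-word-games-2020 | Words game/game of words.py | is_valid_wildcard
-- ===== SOURCE A (Python) =====
-- VOWELS = 'aeiou'
--
-- WILDCARD = '*'
--
-- def is_valid_wildcard(word: str, wordlist: list) -> bool:
--     """
--     Checks for words matching the input, where the WILDCARD is a VOWEL.
--     Returns a boolean according to this.
--     """
--     matches = list()
--     for other_word in wordlist:
--         if len(other_word) == len(word):
--             for char, other in zip(word, other_word):
--                 if (char != other and char != WILDCARD) or (char == WILDCARD and other not in VOWELS):
--                     break
--             else:
--                 matches.append(word)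
--     return bool(matches)
-- ===== SOURCE B (Python) =====
-- VOWELS = 'aeiou'
--
-- WILDCARD = '*'
--
-- def is_valid_wildcard(word: str, wordlist: list) -> bool:
--     # Column-wise sieve: start from all equal-length candidates and narrow the
--     # surviving set one character position at a time.
--     candidates = [w for w in wordlist if len(w) == len(word)]
--     for j, c in enumerate(word):
--         accept = VOWELS if c == WILDCARD else c
--         candidates = [w for w in candidates if w[j] in accept]
--     return bool(candidates)
-- ===== Notes on version B (the rewrite author's own statement) =====
-- stated objective: alternative
-- what changed: B replaces A's per-word nested character loop by a column-wise sieve: it starts from all equal-length candidates and filters the surviving candidate list one character position at a time (vowels where word has '*', the exact character elsewhere), returning whether any candidate survives every column.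
import Mathlib
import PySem

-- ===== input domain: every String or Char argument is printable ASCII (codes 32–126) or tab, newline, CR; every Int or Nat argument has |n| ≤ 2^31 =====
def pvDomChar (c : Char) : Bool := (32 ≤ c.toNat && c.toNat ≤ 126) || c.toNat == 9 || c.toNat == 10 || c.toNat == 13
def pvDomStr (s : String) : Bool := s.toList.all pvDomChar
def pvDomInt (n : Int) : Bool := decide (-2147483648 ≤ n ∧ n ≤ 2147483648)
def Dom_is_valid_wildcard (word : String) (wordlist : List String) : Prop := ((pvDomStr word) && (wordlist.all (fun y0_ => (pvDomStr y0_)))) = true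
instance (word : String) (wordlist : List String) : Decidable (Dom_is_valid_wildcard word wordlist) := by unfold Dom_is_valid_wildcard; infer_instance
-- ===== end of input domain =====

-- B replaces A's per-word nested character loop by a column-wise sieve: it filters the
-- equal-length candidate list one character position at a time (objective: alternative; same cost).

-- ===== PORT A =====
def pvVOWELS : List Char := "aeiou".toList
def pvWILDCARD : Char := '*'

-- the for…else inner loop of A: returns true iff no `break` fires
-- ('other not in VOWELS' on a one-char string is char membership — exact here)
def pvInnerA : List (Char × Char) → Bool
  | [] => true
  | (char, other) :: rest =>
    if (char ≠ other ∧ char ≠ pvWILDCARD) ∨ (char = pvWILDCARD ∧ ¬ (other ∈ pvVOWELS)) then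
      false
    else pvInnerA rest

def is_valid_wildcard (word : String) (wordlist : List String) : Bool :=
  let ms := wordlist.foldl (fun acc other_word =>
    if other_word.toList.length = word.toList.length then
      if pvInnerA (word.toList.zip other_word.toList) then acc ++ [word] else acc
    else acc) ([] : List String)
  !ms.isEmpty

-- ===== PORT B =====
-- 'w[j] in accept': w[j] is a single character; its membership in the string `accept`
-- is character membership — exact here. w[j] cannot raise inside the sieve (every
-- surviving candidate has length = len(word) > j), so the `none` branch is unreachable;
-- it is rendered as `false`.
def pvChk (w : String) (j : Int) (accept : List Char) : Bool :=
  match PySem.Str.pyGet? w j with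
  | some ch => accept.contains ch
  | none => false

def is_valid_wildcard_alt (word : String) (wordlist : List String) : Bool :=
  let candidates := wordlist.filter (fun w => w.toList.length == word.toList.length)
  let final := (PySem.List.enumerate word.toList).foldl
    (fun cands jc =>
      let accept : List Char := if jc.2 = pvWILDCARD then pvVOWELS else [jc.2]
      cands.filter (fun w => pvChk w jc.1 accept)) candidates
  !final.isEmpty

-- ===== PRECONDITION & SPEC =====
def Spec_is_valid_wildcard (word : String) (wordlist : List String) (out : Bool) : Prop := out = is_valid_wildcard_alt word wordlist
instance (word : String) (wordlist : List String) (out : Bool) : Decidable (Spec_is_valid_wildcard word wordlist out) := by unfold Spec_is_valid_wildcard; infer_instance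

-- ===== CLAIM (what is proved, stated in full; the proofs are below) =====
def Claim_equal_is_valid_wildcard : Prop := ∀ (word : String) (wordlist : List String), Dom_is_valid_wildcard word wordlist → Spec_is_valid_wildcard word wordlist (is_valid_wildcard word wordlist)

-- ===== LEMMAS AND PROOFS =====

-- B's sieve: iterated filtering is one filter by the conjunction over the columns
lemma pv_fold_filter {α β : Type} (q : β → α → Bool) (l : List β) (cands : List α) :
    l.foldl (fun cs jc => cs.filter (q jc)) cands
      = cands.filter (fun w => l.all (fun jc => q jc w)) := by
  induction l generalizing cands with
  | nil => simp
  | cons x xs ih => simp [ih, List.filter_filter, Bool.and_comm]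

-- per-candidate: A's break/else inner loop agrees with B's column checks
-- (stated for a suffix of word's characters starting at column s)
lemma pv_inner_eq (cs ws : List Char) (s : Nat) (hlen : s + cs.length ≤ ws.length) :
    pvInnerA (cs.zip (ws.drop s))
      = (PySem.List.enumerate cs (s : Int)).all
          (fun jc => pvChk (String.ofList ws) jc.1
            (if jc.2 = pvWILDCARD then pvVOWELS else [jc.2])) := by
  induction cs generalizing s with
  | nil => simp [pvInnerA]
  | cons c cs ih =>
    have hs : s < ws.length := by simp at hlen; omega
    have hdrop : ws.drop s = ws[s] :: ws.drop (s + 1) := (List.getElem_cons_drop hs).symm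
    have hget : pvChk (String.ofList ws) (s : Int) (if c = pvWILDCARD then pvVOWELS else [c])
        = (if c = pvWILDCARD then pvVOWELS else [c]).contains ws[s] := by
      simp [pvChk, hs, getElem?_pos]
    have hcast : (s : Int) + 1 = ((s + 1 : Nat) : Int) := by push_cast; ring
    rw [hdrop]
    simp only [List.zip_cons_cons, pvInnerA, PySem.List.enumerate_cons, List.all_cons, hcast,
      ih (s + 1) (by simp at hlen ⊢; omega), hget]
    by_cases hc : c = pvWILDCARD
    · subst hc
      by_cases hv : ws[s] ∈ pvVOWELS
      · simp [hv]
      · simp [hv]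
    · by_cases he : c = ws[s]
      · subst he; simp [hc]
      · simp [hc, he, Ne.symm he]

-- a filtered list is empty iff no element passes the filter
lemma pv_isEmpty_filter {α : Type} (p : α → Bool) (l : List α) :
    (l.filter p).isEmpty = !l.any p := by
  induction l with
  | nil => rfl
  | cons x xs ih => by_cases h : p x <;> simp [h, ih]

-- A's append-or-keep foldl is empty iff acc is empty and no element satisfies p
lemma pv_fold_isEmpty {α β : Type} (p : α → Bool) (y : β) (l : List α) (acc : List β) :
    (l.foldl (fun acc o => if p o then acc ++ [y] else acc) acc).isEmpty
      = (acc.isEmpty && !(l.any p)) := by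
  induction l generalizing acc with
  | nil => simp
  | cons x xs ih =>
    by_cases hp : p x
    · simp [hp, ih]
    · simp [hp, ih]

-- ===== VERDICT (by name: the statement is the Claim_ definition above) =====
theorem is_valid_wildcard_spec : Claim_equal_is_valid_wildcard := by
  intro word wordlist _
  unfold Spec_is_valid_wildcard is_valid_wildcard is_valid_wildcard_alt
  have hbody : (fun (acc : List String) (other_word : String) =>
      if other_word.toList.length = word.toList.length then
        if pvInnerA (word.toList.zip other_word.toList) then acc ++ [word] else acc
      else acc)
    = fun acc o =>
      if (decide (o.toList.length = word.toList.length) &&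
          pvInnerA (word.toList.zip o.toList)) then acc ++ [word] else acc := by
    funext acc o
    by_cases h1 : o.toList.length = word.toList.length
    · rw [if_pos h1]
      by_cases h2 : pvInnerA (word.toList.zip o.toList)
      · rw [if_pos h2, if_pos (by simp [h1, h2])]
      · rw [if_neg h2, if_neg (by simp [h2])]
    · rw [if_neg h1, if_neg (by simp only [Bool.and_eq_true, decide_eq_true_eq]; exact fun h => h1 h.1)]
  dsimp only
  rw [hbody, pv_fold_isEmpty, pv_fold_filter, List.filter_filter, pv_isEmpty_filter,
    Bool.not_not]
  simp only [List.isEmpty_nil, Bool.true_and, Bool.not_not]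
  congr 1
  funext o
  by_cases h1 : o.length = word.length
  · have hl : o.toList.length = word.toList.length := by simpa using h1
    have h2 := pv_inner_eq word.toList o.toList 0 (by omega)
    simp only [List.drop_zero, Nat.cast_zero] at h2
    have : String.ofList o.toList = o := by simp
    rw [this] at h2
    simp [hl, h2]
  · simp [h1]
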